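-- pv_equiv track=rewrite | github.com/corey-flynn/Advent2023 | src/main/python/Advent2023/day_12.py | place_permutations
-- ===== SOURCE A (Python) =====
-- def place_permutations(placements, requirements, current=(), idx=0):
--     if idx == len(placements):
--         if requirements.issubset(set(current)):
--             return {current}
--         else:
--             return set()
--
--     permutations = set()
--     for value in placements[idx][1:]:
--         if not current or value >= current[-1] + 2:
--             new_current = current + tuple(range(value, value + placements[idx][0]))
--             next_idx = idx + 1
--             permutations.update(place_permutations(placements, requirements, new_current, next_idx))
--
--     return permutations
-- ===== SOURCE B (Python) =====
-- def place_permutations(placements, requirements, current=(), idx=0):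
--     frontier = {tuple(current)}
--     i = idx
--     while i != len(placements):
--         placement = placements[i]
--         frontier = {cur + tuple(range(v, v + placement[0]))
--                     for cur in frontier
--                     for v in placement[1:]
--                     if not cur or v >= cur[-1] + 2}
--         i += 1
--     return {t for t in frontier if set(requirements).issubset(t)}
-- ===== Notes on version B (the rewrite author's own statement) =====
-- stated objective: alternative
-- what changed: A's index recursion over placements (building each complete tuple depth-first, filtering and collecting set-union results at the leaves) is replaced by one iterative while-loop folding a frontier set of partial tuples over the remaining placement indices, with the requirements filter applied once at the end.
import Mathlib
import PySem

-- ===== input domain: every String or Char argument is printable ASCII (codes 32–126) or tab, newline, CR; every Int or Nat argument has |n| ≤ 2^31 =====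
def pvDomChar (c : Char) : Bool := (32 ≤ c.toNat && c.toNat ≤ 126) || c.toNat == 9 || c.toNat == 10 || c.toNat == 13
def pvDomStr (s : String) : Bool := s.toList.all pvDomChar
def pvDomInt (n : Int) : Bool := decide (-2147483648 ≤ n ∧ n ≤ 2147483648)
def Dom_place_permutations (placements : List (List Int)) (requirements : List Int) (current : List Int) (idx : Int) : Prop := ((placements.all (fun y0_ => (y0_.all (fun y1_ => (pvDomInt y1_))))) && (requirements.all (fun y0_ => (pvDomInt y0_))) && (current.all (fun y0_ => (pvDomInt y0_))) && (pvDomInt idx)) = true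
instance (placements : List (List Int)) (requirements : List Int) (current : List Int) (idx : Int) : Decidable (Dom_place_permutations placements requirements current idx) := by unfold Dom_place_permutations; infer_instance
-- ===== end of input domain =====

-- B replaces A's index recursion by one iterative while-loop folding a frontier set of partial
-- tuples over the remaining placements, with the requirements filter applied once at the end
-- (objective: alternative decomposition, same cost).

-- ===== PORT A =====
-- Literal port of A's recursion.  placements[idx] out of range is an IndexError in Python
-- (the `none` branch); those inputs are excluded by Pre_place_permutations.
def place_permutations (placements : List (List Int)) (requirements : List Int) (current : List Int) (idx : Int) : List (List Int) :=
  if idx = (placements.length : Int) then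
    if PySem.Set.issubset requirements (PySem.Set.ofList current) then [current] else []
  else
    match hrow : PySem.List.pyGet? placements idx with
    | none => []  -- Python raises IndexError here; outside Pre_place_permutations
    | some row =>
      (PySem.List.slice row (some 1) none).foldl
        (fun permutations value =>
          if current.isEmpty || decide (PySem.List.pyGetD current (-1) 0 + 2 ≤ value) then
            PySem.Set.union permutations
              (place_permutations placements requirements
                (current ++ PySem.List.pyRange value (value + PySem.List.pyGetD row 0 0) 1)
                (idx + 1))
          else permutations)
        PySem.Set.empty
termination_by (placements.length - idx).toNat
decreasing_by
  have h : ¬ (PySem.List.pyGet? placements idx = none) := by simp [hrow]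
  rw [PySem.List.pyGet?_eq_none_iff] at h
  have h2 : -(placements.length : Int) ≤ idx ∧ idx < (placements.length : Int) := by
    by_contra hc
    exact h (by unfold PySem.Raise.InRange; omega)
  omega

-- ===== PORT B =====
-- Literal port of Source B's `while i != len(placements)` loop: one step replaces the frontier by
-- the set of all guarded extensions.  placements[i] out of range is an IndexError in Python
-- (the `none` branch); those inputs are excluded by Pre_place_permutations.
def ppAltLoop (placements : List (List Int)) (frontier : List (List Int)) (i : Int) : List (List Int) :=
  if i = (placements.length : Int) then frontier
  else
    match hrow : PySem.List.pyGet? placements i with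
    | none => frontier  -- Python raises IndexError here; outside Pre_place_permutations
    | some placement =>
      ppAltLoop placements
        (PySem.Set.ofList
          (frontier.flatMap (fun cur =>
            ((PySem.List.slice placement (some 1) none).filter
                (fun v => cur.isEmpty || decide (PySem.List.pyGetD cur (-1) 0 + 2 ≤ v))).map
              (fun v => cur ++ PySem.List.pyRange v (v + PySem.List.pyGetD placement 0 0) 1))))
        (i + 1)
termination_by (placements.length - i).toNat
decreasing_by
  have h : ¬ (PySem.List.pyGet? placements i = none) := by simp [hrow]
  rw [PySem.List.pyGet?_eq_none_iff] at h
  have h2 : -(placements.length : Int) ≤ i ∧ i < (placements.length : Int) := by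
    by_contra hc
    exact h (by unfold PySem.Raise.InRange; omega)
  omega

def place_permutations_alt (placements : List (List Int)) (requirements : List Int) (current : List Int) (idx : Int) : List (List Int) :=
  PySem.Set.ofList
    ((ppAltLoop placements (PySem.Set.ofList [current]) idx).filter
      (fun t => PySem.Set.issubset (PySem.Set.ofList requirements) t))

-- ===== PRECONDITION & SPEC =====
-- Pre_ excludes exactly idx > len(placements) and idx < -len(placements), on which both A and B
-- raise IndexError at placements[idx].
def Pre_place_permutations (placements : List (List Int)) (requirements : List Int) (current : List Int) (idx : Int) : Prop :=
  -(placements.length : Int) ≤ idx ∧ idx ≤ (placements.length : Int)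
instance (placements : List (List Int)) (requirements : List Int) (current : List Int) (idx : Int) : Decidable (Pre_place_permutations placements requirements current idx) := by unfold Pre_place_permutations; infer_instance

def pvWitness_place_permutations : List (List Int) × List Int × List Int × Int :=
  ([[1, 3, 6], [2, 5, 8]], [5], [], 0)

def Spec_place_permutations (placements : List (List Int)) (requirements : List Int) (current : List Int) (idx : Int) (out : List (List Int)) : Prop := out = place_permutations_alt placements requirements current idx
instance (placements : List (List Int)) (requirements : List Int) (current : List Int) (idx : Int) (out : List (List Int)) : Decidable (Spec_place_permutations placements requirements current idx out) := by unfold Spec_place_permutations; infer_instance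

-- ===== CLAIM (what is proved, stated in full; the proofs are below) =====
def Claim_equal_place_permutations : Prop := ∀ (placements : List (List Int)) (requirements : List Int) (current : List Int) (idx : Int), Dom_place_permutations placements requirements current idx → Pre_place_permutations placements requirements current idx → Spec_place_permutations placements requirements current idx (place_permutations placements requirements current idx)

-- ===== LEMMAS AND PROOFS =====

-- Proof-side vocabulary: the guard, the extension, the admissible values of one placement,
-- and the raw (dedup-free) DFS leaf list of A's recursion tree.
def pvGuard (cur : List Int) (v : Int) : Bool :=
  cur.isEmpty || decide (PySem.List.pyGetD cur (-1) 0 + 2 ≤ v)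

def pvExt (cur : List Int) (p : List Int) (v : Int) : List Int :=
  cur ++ PySem.List.pyRange v (v + PySem.List.pyGetD p 0 0) 1

def pvVals (p : List Int) (cur : List Int) : List Int :=
  (PySem.List.slice p (some 1) none).filter (fun v => pvGuard cur v)

def pvRaw : List (List Int) → List Int → List (List Int)
  | [], cur => [cur]
  | p :: rest, cur => (pvVals p cur).flatMap (fun v => pvRaw rest (pvExt cur p v))

def pvPass (req : List Int) (t : List Int) : Bool :=
  PySem.Set.issubset req (PySem.Set.ofList t)

def pvStepRaw (fr : List (List Int)) (p : List Int) : List (List Int) :=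
  fr.flatMap (fun cur => (pvVals p cur).map (fun v => pvExt cur p v))

-- the placements A's recursion (and B's while loop) visits from index idx on.
def pvRows (placements : List (List Int)) (idx : Int) : List (List Int) :=
  (PySem.List.pyRange idx (placements.length : Int) 1).map
    (fun i => PySem.List.pyGetD placements i [])

-- `update` by elements already present is the identity.
lemma pv_update_of_subset (s t : List (List Int)) (h : ∀ y ∈ t, y ∈ s) :
    PySem.Set.update s t = s := by
  induction t generalizing s with
  | nil => rfl
  | cons x t ih =>
    rw [PySem.Set.update_cons, PySem.Set.add_of_mem (h x (List.mem_cons_self))]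
    exact ih s (fun y hy => h y (List.mem_cons_of_mem _ hy))

-- `update` ignores duplicates in its right argument.
lemma pv_update_ofList_right (s t : List (List Int)) :
    PySem.Set.update s (PySem.Set.ofList t) = PySem.Set.update s t := by
  induction t using List.reverseRecOn with
  | nil => rfl
  | append_singleton t x ih =>
    rw [PySem.Set.ofList_append_singleton, PySem.Set.update_append]
    by_cases hx : x ∈ t
    · rw [PySem.Set.add_of_mem ((PySem.Set.mem_ofList t x).mpr hx), ih]
      have : PySem.Set.update (PySem.Set.update s t) [x] = PySem.Set.update s t := by
        rw [show PySem.Set.update (PySem.Set.update s t) [x]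
              = PySem.Set.add (PySem.Set.update s t) x from rfl]
        exact PySem.Set.add_of_mem ((PySem.Set.mem_update s t x).mpr (Or.inr hx))
      rw [this]
    · rw [PySem.Set.add_of_not_mem (fun hc => hx ((PySem.Set.mem_ofList t x).mp hc)),
          PySem.Set.update_append, ih]

-- filter commutes with keep-first dedup.
lemma pv_filter_ofList (p : List Int → Bool) (l : List (List Int)) :
    (PySem.Set.ofList l).filter p = PySem.Set.ofList (l.filter p) := by
  induction l using List.reverseRecOn with
  | nil => rfl
  | append_singleton l x ih =>
    rw [PySem.Set.ofList_append_singleton, List.filter_append]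
    by_cases hx : x ∈ l
    · rw [PySem.Set.add_of_mem ((PySem.Set.mem_ofList l x).mpr hx), ih]
      by_cases hp : p x
      · have hmem : x ∈ l.filter p := List.mem_filter.mpr ⟨hx, hp⟩
        rw [show List.filter p [x] = [x] by simp [hp]]
        rw [PySem.Set.ofList_append_singleton,
            PySem.Set.add_of_mem ((PySem.Set.mem_ofList _ x).mpr hmem)]
      · simp [hp]
    · rw [PySem.Set.add_of_not_mem (fun hc => hx ((PySem.Set.mem_ofList l x).mp hc)),
          List.filter_append, ih]
      by_cases hp : p x
      · rw [show List.filter p [x] = [x] by simp [hp]]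
        rw [PySem.Set.ofList_append_singleton,
            PySem.Set.add_of_not_mem
              (fun hc => hx (List.mem_of_mem_filter ((PySem.Set.mem_ofList _ x).mp hc)))]
      · simp [hp]

-- deduplicating the frontier before a flatMap step does not change the deduplicated result.
lemma pv_ofList_flatMap_ofList (f : List Int → List (List Int)) (l : List (List Int)) :
    PySem.Set.ofList ((PySem.Set.ofList l).flatMap f) = PySem.Set.ofList (l.flatMap f) := by
  induction l using List.reverseRecOn with
  | nil => rfl
  | append_singleton l x ih =>
    rw [PySem.Set.ofList_append_singleton]
    by_cases hx : x ∈ l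
    · rw [PySem.Set.add_of_mem ((PySem.Set.mem_ofList l x).mpr hx), ih,
          List.flatMap_append, PySem.Set.ofList_append]
      rw [show (([x] : List (List Int)).flatMap f) = f x by simp]
      exact (pv_update_of_subset _ (f x) (fun y hy =>
        (PySem.Set.mem_ofList _ y).mpr (List.mem_flatMap.mpr ⟨x, hx, hy⟩))).symm
    · rw [PySem.Set.add_of_not_mem (fun hc => hx ((PySem.Set.mem_ofList l x).mp hc)),
          List.flatMap_append, List.flatMap_append, PySem.Set.ofList_append,
          PySem.Set.ofList_append, ih]

lemma pv_filter_flatMap {α β : Type} (l : List α) (f : α → List β) (p : β → Bool) :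
    (l.flatMap f).filter p = l.flatMap (fun x => (f x).filter p) := by
  induction l with
  | nil => rfl
  | cons x l ih => simp [List.flatMap_cons, List.filter_append, ih]

-- A's guarded union-fold is a fold of unions over the admissible values.
lemma pv_foldl_if_union (l : List Int) (g : Int → Bool) (F : Int → List (List Int))
    (init : List (List Int)) :
    l.foldl (fun s v => if g v then PySem.Set.union s (F v) else s) init
      = (l.filter g).foldl (fun s v => PySem.Set.union s (F v)) init := by
  induction l generalizing init with
  | nil => rfl
  | cons v l ih =>
    by_cases hv : g v
    · simp [hv, ih]
    · simp [hv, ih]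

-- chaining unions of deduplicated lists is deduplication of the concatenation.
lemma pv_foldl_union_ofList (l : List Int) (F : Int → List (List Int)) (acc : List (List Int)) :
    l.foldl (fun s v => PySem.Set.union s (PySem.Set.ofList (F v))) (PySem.Set.ofList acc)
      = PySem.Set.ofList (acc ++ l.flatMap F) := by
  induction l generalizing acc with
  | nil => simp
  | cons v l ih =>
    rw [List.foldl_cons,
        show PySem.Set.union (PySem.Set.ofList acc) (PySem.Set.ofList (F v))
           = PySem.Set.update (PySem.Set.ofList acc) (PySem.Set.ofList (F v)) from rfl,
        pv_update_ofList_right, ← PySem.Set.ofList_append, ih]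
    simp

-- A computes the deduplicated filtered raw leaf list of the visited placements.
lemma pv_A_eq (placements : List (List Int)) (req : List Int) :
    ∀ (m : Nat) (idx : Int) (cur : List Int),
      ((placements.length : Int) - idx).toNat = m →
      -(placements.length : Int) ≤ idx → idx ≤ (placements.length : Int) →
      place_permutations placements req cur idx
        = PySem.Set.ofList
            ((pvRaw (pvRows placements idx) cur).filter (fun t => pvPass req t)) := by
  intro m
  induction m with
  | zero =>
    intro idx cur hm hlo hhi
    have hkl : idx = (placements.length : Int) := by omega
    subst hkl
    rw [place_permutations, if_pos rfl,
        show pvRows placements (placements.length : Int) = [] by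
          rw [pvRows, PySem.List.pyRange_one_eq_nil le_rfl]; rfl]
    by_cases hp : PySem.Set.issubset req (PySem.Set.ofList cur) = true
    · rw [if_pos hp]
      have : pvPass req cur = true := hp
      simp [pvRaw, this]
      rfl
    · rw [if_neg hp]
      have : pvPass req cur = false := by
        rw [pvPass]; exact Bool.not_eq_true _ ▸ (by simpa using hp)
      simp [pvRaw, this]
  | succ m ih =>
    intro idx cur hm hlo hhi
    have hlt : idx < (placements.length : Int) := by omega
    rw [place_permutations, if_neg (by omega)]
    have hget : PySem.List.pyGet? placements idx
        = some (PySem.List.pyGetD placements idx []) := by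
      cases h : PySem.List.pyGet? placements idx with
      | none =>
        rw [PySem.List.pyGet?_eq_none_iff] at h
        exact absurd (by unfold PySem.Raise.InRange; omega) h
      | some r =>
        rw [show PySem.List.pyGetD placements idx []
              = (PySem.List.pyGet? placements idx).getD [] from rfl, h]
        rfl
    rw [hget]
    have ih' : ∀ cur' : List Int,
        place_permutations placements req cur' (idx + 1)
          = PySem.Set.ofList
              ((pvRaw (pvRows placements (idx + 1)) cur').filter (fun t => pvPass req t)) :=
      fun cur' => ih (idx + 1) cur' (by omega) (by omega) (by omega)
    simp only [ih']
    rw [pv_foldl_if_union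
          (PySem.List.slice (PySem.List.pyGetD placements idx []) (some 1) none)
          (fun v => cur.isEmpty || decide (PySem.List.pyGetD cur (-1) 0 + 2 ≤ v))
          (fun v => PySem.Set.ofList
            ((pvRaw (pvRows placements (idx + 1))
                (cur ++ PySem.List.pyRange v
                  (v + PySem.List.pyGetD (PySem.List.pyGetD placements idx []) 0 0) 1)).filter
              (fun t => pvPass req t)))]
    rw [show PySem.Set.empty = PySem.Set.ofList ([] : List (List Int)) from rfl]
    rw [pv_foldl_union_ofList]
    rw [show pvRows placements idx
          = PySem.List.pyGetD placements idx [] :: pvRows placements (idx + 1) by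
        rw [pvRows, pvRows, PySem.List.pyRange_one_cons hlt, List.map_cons]]
    rw [show pvRaw (PySem.List.pyGetD placements idx [] :: pvRows placements (idx + 1)) cur
          = (pvVals (PySem.List.pyGetD placements idx []) cur).flatMap
              (fun v => pvRaw (pvRows placements (idx + 1))
                (pvExt cur (PySem.List.pyGetD placements idx []) v)) from rfl]
    rw [pv_filter_flatMap]
    rfl

-- B's while loop computes the deduplicated raw frontier fold over the visited placements.
lemma pv_B_loop (placements : List (List Int)) :
    ∀ (m : Nat) (i : Int) (fr : List (List Int)),
      ((placements.length : Int) - i).toNat = m →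
      -(placements.length : Int) ≤ i → i ≤ (placements.length : Int) →
      ppAltLoop placements (PySem.Set.ofList fr) i
        = PySem.Set.ofList ((pvRows placements i).foldl pvStepRaw fr) := by
  intro m
  induction m with
  | zero =>
    intro i fr hm hlo hhi
    have hkl : i = (placements.length : Int) := by omega
    subst hkl
    rw [ppAltLoop, if_pos rfl,
        show pvRows placements (placements.length : Int) = [] by
          rw [pvRows, PySem.List.pyRange_one_eq_nil le_rfl]; rfl]
    rfl
  | succ m ih =>
    intro i fr hm hlo hhi
    have hlt : i < (placements.length : Int) := by omega
    have hget : PySem.List.pyGet? placements i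
        = some (PySem.List.pyGetD placements i []) := by
      cases h : PySem.List.pyGet? placements i with
      | none =>
        rw [PySem.List.pyGet?_eq_none_iff] at h
        exact absurd (by unfold PySem.Raise.InRange; omega) h
      | some r =>
        rw [show PySem.List.pyGetD placements i []
              = (PySem.List.pyGet? placements i).getD [] from rfl, h]
        rfl
    have hstep : ppAltLoop placements (PySem.Set.ofList fr) i
        = ppAltLoop placements
            (PySem.Set.ofList
              (pvStepRaw (PySem.Set.ofList fr) (PySem.List.pyGetD placements i [])))
            (i + 1) := by
      rw [ppAltLoop, if_neg (by omega), hget]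
      rfl
    rw [hstep,
        show pvStepRaw (PySem.Set.ofList fr) (PySem.List.pyGetD placements i [])
          = (PySem.Set.ofList fr).flatMap
              (fun cur => (pvVals (PySem.List.pyGetD placements i []) cur).map
                (fun v => pvExt cur (PySem.List.pyGetD placements i []) v)) from rfl,
        pv_ofList_flatMap_ofList,
        show fr.flatMap
              (fun cur => (pvVals (PySem.List.pyGetD placements i []) cur).map
                (fun v => pvExt cur (PySem.List.pyGetD placements i []) v))
          = pvStepRaw fr (PySem.List.pyGetD placements i []) from rfl,
        ih (i + 1) (pvStepRaw fr (PySem.List.pyGetD placements i [])) (by omega) (by omega)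
          (by omega),
        show pvRows placements i
          = PySem.List.pyGetD placements i [] :: pvRows placements (i + 1) by
        rw [pvRows, pvRows, PySem.List.pyRange_one_cons hlt, List.map_cons]]
    rfl

-- the raw frontier fold is the raw DFS leaf list (BFS order = DFS order, exactly).
lemma pv_B_raw (rest : List (List Int)) (fr : List (List Int)) :
    rest.foldl pvStepRaw fr = fr.flatMap (fun cur => pvRaw rest cur) := by
  induction rest generalizing fr with
  | nil => simp [pvRaw]
  | cons p rest ih =>
    rw [List.foldl_cons, ih (pvStepRaw fr p), pvStepRaw, List.flatMap_assoc]
    congr 1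
    funext cur
    rw [List.flatMap_map]
    rfl

-- B computes the same deduplicated filtered raw leaf list.
lemma pv_B_eq (placements : List (List Int)) (req : List Int) (cur : List Int) (idx : Int)
    (hlo : -(placements.length : Int) ≤ idx) (hhi : idx ≤ (placements.length : Int)) :
    place_permutations_alt placements req cur idx
      = PySem.Set.ofList
          ((pvRaw (pvRows placements idx) cur).filter (fun t => pvPass req t)) := by
  unfold place_permutations_alt
  rw [pv_B_loop placements (((placements.length : Int) - idx).toNat) idx [cur] rfl hlo hhi,
      pv_B_raw]
  rw [show ([cur] : List (List Int)).flatMap (fun c => pvRaw (pvRows placements idx) c)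
        = pvRaw (pvRows placements idx) cur by simp]
  have hb : ∀ t : List Int,
      PySem.Set.issubset (PySem.Set.ofList req) t = pvPass req t := by
    intro t
    rw [pvPass]
    rw [Bool.eq_iff_iff]
    constructor
    · intro hs
      rw [PySem.Set.issubset_iff] at hs ⊢
      intro x hx
      exact (PySem.Set.mem_ofList t x).mpr (hs x ((PySem.Set.mem_ofList req x).mpr hx))
    · intro hs
      rw [PySem.Set.issubset_iff] at hs ⊢
      intro x hx
      exact (PySem.Set.mem_ofList t x).mp (hs x ((PySem.Set.mem_ofList req x).mp hx))
  show PySem.Set.ofList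
      (List.filter (fun t => (PySem.Set.ofList req).issubset t)
        (PySem.Set.ofList (pvRaw (pvRows placements idx) cur))) = _
  rw [List.filter_congr (fun t _ => hb t), pv_filter_ofList, PySem.Set.ofList_ofList]

-- ===== VERDICT (by name: the statement is the Claim_ definition above) =====
theorem place_permutations_spec : Claim_equal_place_permutations := by
  intro placements requirements current idx _ hpre
  obtain ⟨hlo, hhi⟩ := hpre
  unfold Spec_place_permutations
  rw [pv_B_eq placements requirements current idx hlo hhi]
  exact pv_A_eq placements requirements (((placements.length : Int) - idx).toNat) idx current
    rfl hlo hhi
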